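-- pv_equiv track=rewrite | github.com/stefanko-nexus-stacks/nexus-thomas-greber | src/nexus_deploy/setup.py | strip_existing_block
-- ===== SOURCE A (Python) =====
-- def strip_existing_block(config_text: str, host_alias: str) -> str:
--     """Remove the existing ``Host <alias>`` block from a config text.
--
--     Matches the legacy awk's behaviour: skip starting at ``Host
--     <alias>`` line, stop skipping at the next ``Host `` line (which
--     is preserved). Idempotent on configs that don't contain the
--     block. Unlike the legacy awk, normalizes the result so we never
--     leave more than one consecutive blank line at a boundary —
--     important when the surrounding bytes are diffed against a
--     snapshot.
--     """
--     out_lines: list[str] = []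
--     skip = False
--     target = f"Host {host_alias}"
--     for raw_line in config_text.splitlines():
--         stripped = raw_line.strip()
--         if stripped == target:
--             skip = True
--             continue
--         # Re-encounter any other `Host ` line ends the skip BEFORE
--         # we consume that line — same as the awk: `/^Host / && skip
--         # { skip=0 }` runs on the boundary line, then `!skip { print }`
--         # prints it.
--         if skip and stripped.startswith("Host "):
--             skip = False
--         if not skip:
--             out_lines.append(raw_line)
--     # Collapse trailing blanks but preserve one (POSIX text-file convention).
--     while len(out_lines) > 1 and out_lines[-1] == "" and out_lines[-2] == "":
--         out_lines.pop()
--     return "\n".join(out_lines)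
-- ===== SOURCE B (Python) =====
-- def strip_existing_block(config_text: str, host_alias: str) -> str:
--     target = "Host " + host_alias
--     preamble: list[str] = []
--     segments: list[list[str]] = []
--     for line in config_text.splitlines():
--         if line.strip().startswith("Host "):
--             segments.append([line])
--         elif segments:
--             segments[-1].append(line)
--         else:
--             preamble.append(line)
--     out_lines = preamble
--     for seg in segments:
--         if seg[0].strip() != target:
--             out_lines.extend(seg)
--     while len(out_lines) > 1 and out_lines[-1] == "" and out_lines[-2] == "":
--         out_lines.pop()
--     return "\n".join(out_lines)
-- ===== Notes on version B (the rewrite author's own statement) =====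
-- stated objective: alternative
-- what changed: A's single pass with a skip flag is replaced by a two-phase decomposition: first partition the lines into a preamble plus `Host `-headed segments, then keep exactly the segments whose stripped header is not the target and flatten, with the same trailing-blank collapse.
import Mathlib
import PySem

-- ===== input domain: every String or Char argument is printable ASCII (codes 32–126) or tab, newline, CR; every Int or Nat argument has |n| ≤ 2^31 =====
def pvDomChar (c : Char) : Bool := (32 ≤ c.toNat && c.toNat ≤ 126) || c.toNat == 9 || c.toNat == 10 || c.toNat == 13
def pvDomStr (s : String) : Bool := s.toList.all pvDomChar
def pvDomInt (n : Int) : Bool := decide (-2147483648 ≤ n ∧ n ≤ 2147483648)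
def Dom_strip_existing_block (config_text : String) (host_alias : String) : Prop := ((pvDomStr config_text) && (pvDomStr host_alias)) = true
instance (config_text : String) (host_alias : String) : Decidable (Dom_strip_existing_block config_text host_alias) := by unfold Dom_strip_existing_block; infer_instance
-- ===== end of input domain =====

-- B replaces A's single skip-flag pass by a partition of the lines into a preamble and
-- `Host `-headed segments, then keeps exactly the segments whose header is not the target
-- (objective: alternative decomposition, same O(n) cost).

-- ===== PORT A =====
-- trailing-blank collapse: `while len(out)>1 and out[-1]=="" and out[-2]=="": out.pop()`
def pvCollapseA (xs : List String) : List String :=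
  if 1 < xs.length ∧ PySem.List.pyGet? xs (-1) = some "" ∧ PySem.List.pyGet? xs (-2) = some "" then
    pvCollapseA xs.dropLast
  else xs
termination_by xs.length
decreasing_by simp_all [List.length_dropLast]; omega

-- the body of A's `for raw_line in config_text.splitlines()` loop, state = (out_lines, skip)
def pvStepA (target : String) (st : List String × Bool) (raw_line : String) : List String × Bool :=
  let stripped := PySem.Str.strip raw_line
  if stripped == target then (st.1, true)
  else
    let skip := if st.2 && PySem.Str.startswith stripped "Host " then false else st.2
    if !skip then (st.1 ++ [raw_line], skip) else (st.1, skip)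

def strip_existing_block (config_text : String) (host_alias : String) : String :=
  let target := "Host " ++ host_alias
  let out_lines := ((PySem.Str.splitlines config_text).foldl (pvStepA target) ([], false)).1
  PySem.Str.join "\n" (pvCollapseA out_lines)

-- ===== PORT B =====
def pvCollapseB (xs : List String) : List String :=
  if 1 < xs.length ∧ PySem.List.pyGet? xs (-1) = some "" ∧ PySem.List.pyGet? xs (-2) = some "" then
    pvCollapseB xs.dropLast
  else xs
termination_by xs.length
decreasing_by simp_all [List.length_dropLast]; omega

-- B's first loop: partition the lines into (preamble, segments); `segments[-1].append(line)`
-- is `dropLast ++ [getLastD ++ [line]]`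
def pvStepB (st : List String × List (List String)) (line : String) : List String × List (List String) :=
  if PySem.Str.startswith (PySem.Str.strip line) "Host " then (st.1, st.2 ++ [[line]])
  else
    match st.2 with
    | [] => (st.1 ++ [line], [])
    | s :: rest => (st.1, (s :: rest).dropLast ++ [(s :: rest).getLastD [] ++ [line]])

-- B's second loop: `if seg[0].strip() != target: out_lines.extend(seg)`
def pvKeepStep (target : String) (acc : List String) (seg : List String) : List String :=
  if PySem.Str.strip (seg.headD "") != target then acc ++ seg else acc

def strip_existing_block_alt (config_text : String) (host_alias : String) : String :=
  let target := "Host " ++ host_alias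
  let st := (PySem.Str.splitlines config_text).foldl pvStepB ([], [])
  let out_lines := st.2.foldl (pvKeepStep target) st.1
  PySem.Str.join "\n" (pvCollapseB out_lines)

-- ===== PRECONDITION & SPEC =====
def Spec_strip_existing_block (config_text : String) (host_alias : String) (out : String) : Prop := out = strip_existing_block_alt config_text host_alias
instance (config_text : String) (host_alias : String) (out : String) : Decidable (Spec_strip_existing_block config_text host_alias out) := by unfold Spec_strip_existing_block; infer_instance

-- ===== CLAIM (what is proved, stated in full; the proofs are below) =====
def Claim_equal_strip_existing_block : Prop := ∀ (config_text : String) (host_alias : String), Dom_strip_existing_block config_text host_alias → Spec_strip_existing_block config_text host_alias (strip_existing_block config_text host_alias)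

-- ===== LEMMAS AND PROOFS =====

-- a segment is kept iff its header (stripped) is not the target
def pvGood (target : String) (seg : List String) : Bool := !(PySem.Str.strip (seg.headD "") == target)
-- A's skip flag, reconstructed from B's state: true iff the last open segment is a target block
def pvBadLast (target : String) (segs : List (List String)) : Bool :=
  ((segs.getLast?).map (fun s => PySem.Str.strip (s.headD "") == target)).getD false
-- A's out_lines, reconstructed from B's state
def pvAbs (target : String) (pre : List String) (segs : List (List String)) : List String :=
  pre ++ (segs.filter (pvGood target)).flatten

theorem pvCollapse_eq (xs : List String) : pvCollapseA xs = pvCollapseB xs := by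
  rw [pvCollapseA, pvCollapseB]
  split
  · exact pvCollapse_eq xs.dropLast
  · rfl
termination_by xs.length
decreasing_by simp_all [List.length_dropLast]; omega

lemma pv_target_host (host_alias : String) :
    PySem.Str.startswith ("Host " ++ host_alias) "Host " = true := by
  simp [PySem.Str.startswith_eq, PySem.Chars.startswith_iff, String.toList_append]

lemma pvBadLast_concat (target : String) (D : List (List String)) (X : List String) :
    pvBadLast target (D ++ [X]) = (PySem.Str.strip (X.headD "") == target) := by
  simp [pvBadLast]

lemma pvAbs_concat (target : String) (pre : List String) (D : List (List String)) (X : List String) :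
    pvAbs target pre (D ++ [X]) = pvAbs target pre D ++ (if pvGood target X then X else []) := by
  simp only [pvAbs, List.filter_append, List.flatten_append, List.append_assoc]
  congr 2
  cases hg : pvGood target X <;> simp [hg]

lemma pv_step_corr (target : String) (hT : PySem.Str.startswith target "Host " = true)
    (pre : List String) (segs : List (List String)) (h : ∀ s ∈ segs, s ≠ []) (l : String) :
    pvStepA target (pvAbs target pre segs, pvBadLast target segs) l
      = (pvAbs target (pvStepB (pre, segs) l).1 (pvStepB (pre, segs) l).2,
         pvBadLast target (pvStepB (pre, segs) l).2)
    ∧ ∀ s ∈ (pvStepB (pre, segs) l).2, s ≠ [] := by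
  by_cases hH : PySem.Str.startswith (PySem.Str.strip l) "Host " = true
  · -- a `Host ` line: B opens a new segment
    have hB : pvStepB (pre, segs) l = (pre, segs ++ [[l]]) := by
      rw [pvStepB, if_pos hH]
    rw [hB]
    refine ⟨?_, ?_⟩
    · by_cases hTgt : (PySem.Str.strip l == target) = true
      · simp only [pvStepA, if_pos hTgt, pvAbs_concat, pvBadLast_concat]
        simp [pvGood, hTgt]
      · cases hb : pvBadLast target segs <;>
        · simp only [pvStepA, if_neg hTgt, pvAbs_concat, pvBadLast_concat, hH]
          simp [pvGood, hTgt]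
    · intro u hu
      rcases List.mem_append.mp hu with hu | hu
      · exact h u hu
      · simp at hu; simp [hu]
  · -- an ordinary line
    have hTgt : (PySem.Str.strip l == target) = false := by
      cases hE : PySem.Str.strip l == target
      · rfl
      · exact absurd (by rw [show PySem.Str.strip l = target from by simpa using hE] at hH; exact hH hT) (by simp)
    cases segs with
    | nil =>
      have hB : pvStepB (pre, []) l = (pre ++ [l], []) := by
        rw [pvStepB, if_neg hH]
      rw [hB]
      refine ⟨?_, by simp⟩
      simp only [pvStepA, if_neg (by simp [hTgt] : ¬(PySem.Str.strip l == target) = true)]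
      simp [pvAbs, pvBadLast]
    | cons s rest =>
      have hne : s :: rest ≠ [] := List.cons_ne_nil s rest
      have hL : (s :: rest).getLastD [] = (s :: rest).getLast hne := by
        rw [List.getLastD_eq_getLast?, List.getLast?_eq_some_getLast hne]
        rfl
      have hLne : (s :: rest).getLastD [] ≠ [] := by
        rw [hL]; exact h _ (List.getLast_mem hne)
      obtain ⟨D, hD⟩ : ∃ D, s :: rest = D ++ [(s :: rest).getLastD []] :=
        ⟨(s :: rest).dropLast, by
          conv_lhs => rw [← List.dropLast_append_getLast hne]
          rw [hL]⟩
      have hDrop : (s :: rest).dropLast = D := by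
        have := congrArg List.dropLast hD
        simpa using this
      obtain ⟨x, t, hx⟩ : ∃ x t, (s :: rest).getLastD [] = x :: t := by
        cases hc : (s :: rest).getLastD [] with
        | nil => exact absurd hc hLne
        | cons x t => exact ⟨x, t, rfl⟩
      have hB : pvStepB (pre, s :: rest) l
          = (pre, D ++ [(s :: rest).getLastD [] ++ [l]]) := by
        rw [pvStepB, if_neg hH]
        dsimp only
        rw [hDrop]
      have hhead : ((s :: rest).getLastD [] ++ [l]).headD "" = ((s :: rest).getLastD []).headD "" := by
        rw [hx]; rfl
      have hH' : PySem.Str.startswith (PySem.Str.strip l) "Host " = false :=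
        Bool.eq_false_iff.mpr hH
      have hHc : PySem.Chars.startswith (PySem.Chars.strip l.toList) ['H','o','s','t',' '] = false := by
        simpa [PySem.Str.startswith_eq, PySem.Str.toList_strip,
          show "Host ".toList = ['H','o','s','t',' '] from rfl] using hH' 
      have hgood : pvGood target ((s :: rest).getLastD [] ++ [l]) = pvGood target ((s :: rest).getLastD []) := by
        rw [pvGood, pvGood, hhead]
      rw [hB]
      refine ⟨?_, ?_⟩
      · conv_lhs => rw [hD]
        rw [pvStepA]
        rw [if_neg (show ¬((PySem.Str.strip l == target) = true) by simp [hTgt])]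
        rw [pvAbs_concat, pvAbs_concat, pvBadLast_concat, pvBadLast_concat, hhead, hgood]
        rw [pvGood]
        cases hb : PySem.Str.strip (((s :: rest).getLastD []).headD "") == target
        · -- open segment kept: A prints l, B appends l to the segment
          simp [hHc, List.append_assoc]
        · -- open segment is the target block: A skips l
          simp [hHc]
      · intro u hu
        rcases List.mem_append.mp hu with hu | hu
        · exact h u (by rw [hD]; exact List.mem_append_left _ hu)
        · simp at hu; simp [hu]

lemma pv_fold_corr (target : String) (hT : PySem.Str.startswith target "Host " = true)
    (lines : List String) :
    ∀ (pre : List String) (segs : List (List String)), (∀ s ∈ segs, s ≠ []) →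
    lines.foldl (pvStepA target) (pvAbs target pre segs, pvBadLast target segs)
      = (pvAbs target (lines.foldl pvStepB (pre, segs)).1 (lines.foldl pvStepB (pre, segs)).2,
         pvBadLast target (lines.foldl pvStepB (pre, segs)).2) := by
  induction lines with
  | nil => intro pre segs _; simp
  | cons l ls ih =>
    intro pre segs h
    have hs := pv_step_corr target hT pre segs h l
    simp only [List.foldl_cons, hs.1]
    have := ih (pvStepB (pre, segs) l).1 (pvStepB (pre, segs) l).2 hs.2
    simpa using this

lemma pv_keep_eq (target : String) (segs : List (List String)) :
    ∀ pre, segs.foldl (pvKeepStep target) pre = pvAbs target pre segs := by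
  induction segs with
  | nil => intro pre; simp [pvAbs]
  | cons s rest ih =>
    intro pre
    simp only [List.foldl_cons, ih]
    by_cases hg : pvGood target s = true
    · simp [pvKeepStep, pvAbs, pvGood, List.filter_cons] at hg ⊢
      simp [hg]
    · simp [pvKeepStep, pvAbs, pvGood, List.filter_cons] at hg ⊢
      simp [hg]

-- ===== VERDICT (by name: the statement is the Claim_ definition above) =====
theorem strip_existing_block_spec : Claim_equal_strip_existing_block := by
  intro config_text host_alias _
  unfold Spec_strip_existing_block strip_existing_block strip_existing_block_alt
  have hT := pv_target_host host_alias
  have h := pv_fold_corr ("Host " ++ host_alias) hT (PySem.Str.splitlines config_text) [] []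
    (by simp)
  show PySem.Str.join "\n" (pvCollapseA ((List.foldl (pvStepA ("Host " ++ host_alias)) ([], false) (PySem.Str.splitlines config_text)).1))
    = PySem.Str.join "\n" (pvCollapseB (List.foldl (pvKeepStep ("Host " ++ host_alias))
        (List.foldl pvStepB ([], []) (PySem.Str.splitlines config_text)).1
        (List.foldl pvStepB ([], []) (PySem.Str.splitlines config_text)).2))
  rw [pv_keep_eq]
  have habs : pvAbs ("Host " ++ host_alias) [] [] = [] := by simp [pvAbs]
  have hbad : pvBadLast ("Host " ++ host_alias) ([] : List (List String)) = false := by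
    simp [pvBadLast]
  rw [habs, hbad] at h
  simp only [h, pvCollapse_eq]
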